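-- pv_equiv track=rewrite | github.com/yunusemregul0/PythonNumberGame | 211307009.py | oyun_devam
-- ===== SOURCE A (Python) =====
-- def oyun_devam(sayilar_matrisi):
--     for i in range(len(sayilar_matrisi)):
--         for j in range(len(sayilar_matrisi[0])):
--             value = sayilar_matrisi[i][j]
--             if value == "":
--                 continue
--             komsular = [(i - 1, j), (i + 1, j), (i, j - 1), (i, j + 1)]
--             for komsu in komsular:
--                 k_satir, k_sutun = komsu
--                 if 0 <= k_satir < len(sayilar_matrisi) and 0 <= k_sutun < len(sayilar_matrisi[0]) and \
--                         sayilar_matrisi[k_satir][k_sutun] == value: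
--                     return True
--     return False
-- ===== SOURCE B (Python) =====
-- def oyun_devam(sayilar_matrisi):
--     # the grid's width is given by the first row; extra columns are not part of the grid
--     w = len(sayilar_matrisi[0]) if sayilar_matrisi else 0
--     grid = [row[:w] for row in sayilar_matrisi]
--     # horizontal pass: adjacent cells within each row
--     for row in grid:
--         for a, b in zip(row, row[1:]):
--             if a == b and a != "":
--                 return True
--     # vertical pass: column-wise pairs of consecutive rows
--     for r1, r2 in zip(grid, grid[1:]):
--         for a, b in zip(r1, r2):
--             if a == b and a != "":
--                 return True
--     return False
-- ===== Notes on version B (the rewrite author's own statement) =====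
-- stated objective: simpler
-- what changed: Per-cell 4-neighbour coordinate/bounds checking is replaced by truncating rows to the grid width len(m[0]) and two pairwise zip passes (adjacent cells within each row, then column-wise pairs of consecutive rows); Pre_ excludes matrices with a row shorter than the first, on which A raises IndexError unless its scan finds an adjacent pair first (then both return True).
-- outside the precondition, e.g. on oyun_devam([['1', '1'], ['2']]): A returns True, B returns True
import Mathlib
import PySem

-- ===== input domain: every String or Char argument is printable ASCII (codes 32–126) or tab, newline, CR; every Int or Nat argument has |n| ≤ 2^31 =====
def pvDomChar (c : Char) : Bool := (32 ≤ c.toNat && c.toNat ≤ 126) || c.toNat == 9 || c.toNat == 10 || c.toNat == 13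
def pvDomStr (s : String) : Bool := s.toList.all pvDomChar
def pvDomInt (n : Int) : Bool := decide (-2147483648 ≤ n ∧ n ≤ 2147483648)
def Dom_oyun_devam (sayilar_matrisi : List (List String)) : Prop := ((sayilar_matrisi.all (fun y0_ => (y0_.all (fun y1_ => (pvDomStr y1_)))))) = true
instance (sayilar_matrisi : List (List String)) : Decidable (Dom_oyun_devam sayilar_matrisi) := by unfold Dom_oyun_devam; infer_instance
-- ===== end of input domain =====

-- B replaces A's per-cell 4-neighbour coordinate/bounds checking by two pairwise zip passes
-- (adjacent cells within each row, then column-wise pairs of consecutive rows) — simpler.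

-- ===== PORT A =====
-- sayilar_matrisi[i] with a default (read only in range on the inputs admitted by Pre_)
def pvRowA (m : List (List String)) (i : Int) : List String :=
  (PySem.List.pyGet? m i).getD []
-- sayilar_matrisi[i][j] with a default (read only in range on the inputs admitted by Pre_)
def pvCellA (m : List (List String)) (i j : Int) : String :=
  (PySem.List.pyGet? (pvRowA m i) j).getD ""

def oyun_devam (sayilar_matrisi : List (List String)) : Bool :=
  (PySem.List.pyRange 0 (PySem.List.len sayilar_matrisi) 1).any (fun i =>
    (PySem.List.pyRange 0 (PySem.List.len (pvRowA sayilar_matrisi 0)) 1).any (fun j =>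
      let value := pvCellA sayilar_matrisi i j
      if value == "" then false
      else
        [(i - 1, j), (i + 1, j), (i, j - 1), (i, j + 1)].any (fun komsu =>
          decide (0 ≤ komsu.1) && decide (komsu.1 < PySem.List.len sayilar_matrisi) &&
          decide (0 ≤ komsu.2) && decide (komsu.2 < PySem.List.len (pvRowA sayilar_matrisi 0)) &&
          (pvCellA sayilar_matrisi komsu.1 komsu.2 == value))))

-- ===== PORT B =====
def pvPairHit (p : String × String) : Bool := p.1 == p.2 && p.1 != ""

def oyun_devam_alt (sayilar_matrisi : List (List String)) : Bool :=
  let w := (sayilar_matrisi.headD []).length   -- len(m[0]) if m else 0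
  let grid := sayilar_matrisi.map (fun row => row.take w)   -- [row[:w] for row in m]
  (grid.any (fun row => (row.zip row.tail).any pvPairHit)) ||
  ((grid.zip grid.tail).any (fun rr => (rr.1.zip rr.2).any pvPairHit))

-- ===== PRECONDITION & SPEC =====
-- Pre_ excludes matrices with a row shorter than the first row: there A raises IndexError,
-- except when its scan happens to find an adjacent pair before reaching the short row (then both return True).
def Pre_oyun_devam (sayilar_matrisi : List (List String)) : Prop :=
  ∀ r ∈ sayilar_matrisi, (sayilar_matrisi.headD []).length ≤ r.length
instance (sayilar_matrisi : List (List String)) : Decidable (Pre_oyun_devam sayilar_matrisi) := by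
  unfold Pre_oyun_devam; infer_instance

def pvWitness_oyun_devam : List (List String) := [["1", "2"], ["3", "1"]]

def Spec_oyun_devam (sayilar_matrisi : List (List String)) (out : Bool) : Prop := out = oyun_devam_alt sayilar_matrisi
instance (sayilar_matrisi : List (List String)) (out : Bool) : Decidable (Spec_oyun_devam sayilar_matrisi out) := by unfold Spec_oyun_devam; infer_instance

-- ===== CLAIM (what is proved, stated in full; the proofs are below) =====
def Claim_equal_oyun_devam : Prop := ∀ (sayilar_matrisi : List (List String)), Dom_oyun_devam sayilar_matrisi → Pre_oyun_devam sayilar_matrisi → Spec_oyun_devam sayilar_matrisi (oyun_devam sayilar_matrisi)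

-- ===== LEMMAS AND PROOFS =====

-- cell (i, j) read with defaults, Nat indices
def pvCellN (m : List (List String)) (i j : Nat) : String := (m.getD i []).getD j ""

-- the common characterisation: some horizontally / vertically adjacent equal non-empty pair
def AdjH (m : List (List String)) : Prop :=
  ∃ i j, i < m.length ∧ j + 1 < (m.headD []).length ∧
    pvCellN m i j ≠ "" ∧ pvCellN m i j = pvCellN m i (j + 1)
def AdjV (m : List (List String)) : Prop :=
  ∃ i j, i + 1 < m.length ∧ j < (m.headD []).length ∧
    pvCellN m i j ≠ "" ∧ pvCellN m i j = pvCellN m (i + 1) j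

theorem pvCellA_natCast (m : List (List String)) (i j : Nat) :
    pvCellA m (i : Int) (j : Int) = pvCellN m i j := by
  simp [pvCellA, pvRowA, pvCellN, PySem.List.pyGet?_natCast, List.getD]

theorem A_iff (m : List (List String)) : oyun_devam m = true ↔ (AdjH m ∨ AdjV m) := by
  have hrow0 : pvRowA m 0 = m.headD [] := by
    cases m <;> simp [pvRowA, PySem.List.pyGet?, PySem.List.pyIdx?]
  constructor
  · intro h
    simp only [oyun_devam, List.any_eq_true, PySem.List.mem_pyRange_one, PySem.List.len_eq, hrow0,
      List.any_cons, List.any_nil, Bool.or_false, beq_iff_eq] at h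
    obtain ⟨i, ⟨hi0, hin⟩, j, ⟨hj0, hjw⟩, hx⟩ := h
    by_cases hv : pvCellA m i j = ""
    · simp [hv] at hx
    · rw [if_neg hv] at hx
      lift i to ℕ using hi0 with i'
      lift j to ℕ using hj0 with j'
      rw [pvCellA_natCast] at hv
      simp only [Bool.or_eq_true, Bool.and_eq_true, decide_eq_true_eq, beq_iff_eq] at hx
      rcases hx with ⟨⟨⟨⟨h1, h2⟩, _⟩, _⟩, he⟩ | ⟨⟨⟨⟨_, h2⟩, _⟩, _⟩, he⟩ | ⟨⟨⟨_, h3⟩, _⟩, he⟩ | ⟨⟨⟨_, _⟩, h4⟩, he⟩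
      · -- neighbour (i-1, j)
        rw [show ((i' : Int) - 1) = ((i' - 1 : Nat) : Int) by omega, pvCellA_natCast,
          pvCellA_natCast] at he
        exact Or.inr ⟨i' - 1, j', by omega, by omega, by rw [he]; exact hv,
          by rw [show i' - 1 + 1 = i' by omega]; exact he⟩
      · -- neighbour (i+1, j)
        rw [show ((i' : Int) + 1) = ((i' + 1 : Nat) : Int) by omega, pvCellA_natCast,
          pvCellA_natCast] at he
        exact Or.inr ⟨i', j', by omega, by omega, hv, he.symm⟩
      · -- neighbour (i, j-1)
        rw [show ((j' : Int) - 1) = ((j' - 1 : Nat) : Int) by omega, pvCellA_natCast,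
          pvCellA_natCast] at he
        exact Or.inl ⟨i', j' - 1, by omega, by omega, by rw [he]; exact hv,
          by rw [show j' - 1 + 1 = j' by omega]; exact he⟩
      · -- neighbour (i, j+1)
        rw [show ((j' : Int) + 1) = ((j' + 1 : Nat) : Int) by omega, pvCellA_natCast,
          pvCellA_natCast] at he
        exact Or.inl ⟨i', j', by omega, by omega, hv, he.symm⟩
  · intro h
    simp only [oyun_devam, List.any_eq_true, PySem.List.mem_pyRange_one, PySem.List.len_eq, hrow0,
      List.any_cons, List.any_nil, Bool.or_false, beq_iff_eq] at *
    rcases h with ⟨i, j, hi, hj, hne, heq⟩ | ⟨i, j, hi, hj, hne, heq⟩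
    · refine ⟨(i : Int), ⟨by omega, by omega⟩, (j : Int), ⟨by omega, by omega⟩, ?_⟩
      rw [if_neg (by rw [pvCellA_natCast]; exact hne)]
      simp only [Bool.or_eq_true, Bool.and_eq_true, decide_eq_true_eq, beq_iff_eq]
      refine Or.inr (Or.inr (Or.inr ⟨⟨⟨⟨by omega, by omega⟩, by omega⟩, by omega⟩, ?_⟩))
      rw [show ((j : Int) + 1) = ((j + 1 : Nat) : Int) by omega, pvCellA_natCast, pvCellA_natCast]
      exact heq.symm
    · refine ⟨(i : Int), ⟨by omega, by omega⟩, (j : Int), ⟨by omega, by omega⟩, ?_⟩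
      rw [if_neg (by rw [pvCellA_natCast]; exact hne)]
      simp only [Bool.or_eq_true, Bool.and_eq_true, decide_eq_true_eq, beq_iff_eq]
      refine Or.inr (Or.inl ⟨⟨⟨⟨by omega, by omega⟩, by omega⟩, by omega⟩, ?_⟩)
      rw [show ((i : Int) + 1) = ((i + 1 : Nat) : Int) by omega, pvCellA_natCast, pvCellA_natCast]
      exact heq.symm

theorem pvCellN_eq (m : List (List String)) (i j : Nat) (hi : i < m.length)
    (hj : j < m[i].length) : pvCellN m i j = m[i][j] := by
  simp [pvCellN, List.getD, List.getElem?_eq_getElem hi, List.getElem?_eq_getElem hj]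

theorem pvPairHit_iff (p : String × String) : pvPairHit p = true ↔ p.1 = p.2 ∧ p.1 ≠ "" := by
  simp [pvPairHit]

theorem B_iff (m : List (List String)) (hp : Pre_oyun_devam m) :
    oyun_devam_alt m = true ↔ (AdjH m ∨ AdjV m) := by
  have hw : ∀ (i : Nat) (h : i < m.length),
      (m[i].take (m.headD []).length).length = (m.headD []).length := by
    intro i h
    have h2 := hp m[i] (List.getElem_mem h)
    simp only [List.length_take]
    omega
  have hcell : ∀ (i j : Nat) (hi : i < m.length) (hj : j < (m.headD []).length),
      (m[i].take (m.headD []).length)[j]'(by rw [hw i hi]; exact hj) = pvCellN m i j := by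
    intro i j hi hj
    rw [List.getElem_take, pvCellN_eq m i j hi (by have := hp m[i] (List.getElem_mem hi); omega)]
  simp only [oyun_devam_alt, Bool.or_eq_true, List.any_eq_true]
  constructor
  · rintro (⟨row, hrow, p, hpmem, hhit⟩ | ⟨rr, hrr, p, hpmem, hhit⟩)
    · obtain ⟨i, hi, rfl⟩ := List.mem_iff_getElem.mp hrow
      rw [List.length_map] at hi
      rw [List.getElem_map] at hpmem
      obtain ⟨k, hk, rfl⟩ := List.mem_iff_getElem.mp hpmem
      simp only [List.length_zip, List.length_tail, lt_min_iff, hw i hi] at hk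
      rw [List.getElem_zip, pvPairHit_iff] at hhit
      obtain ⟨heq, hne⟩ := hhit
      simp only [List.getElem_tail, hcell i k hi (by omega), hcell i (k + 1) hi (by omega)]
        at heq hne
      exact Or.inl ⟨i, k, hi, by omega, hne, heq⟩
    · obtain ⟨i, hi, rfl⟩ := List.mem_iff_getElem.mp hrr
      simp only [List.length_zip, List.length_tail, List.length_map, lt_min_iff] at hi
      obtain ⟨k, hk, rfl⟩ := List.mem_iff_getElem.mp hpmem
      rw [List.getElem_zip, pvPairHit_iff] at hhit
      obtain ⟨heq, hne⟩ := hhit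
      have hi1 : i < m.length := by omega
      have hi2 : i + 1 < m.length := by omega
      simp only [List.getElem_zip, List.getElem_tail, List.getElem_map, List.length_zip,
        List.length_tail, List.length_map, lt_min_iff, hw i hi1, hw (i + 1) hi2] at hk heq hne
      simp only [hcell i k hi1 (by omega), hcell (i + 1) k hi2 (by omega)] at heq hne
      exact Or.inr ⟨i, k, hi2, by omega, hne, heq⟩
  · rintro (⟨i, j, hi, hj, hne, heq⟩ | ⟨i, j, hi, hj, hne, heq⟩)
    · left
      refine ⟨m[i].take (m.headD []).length,
        List.mem_iff_getElem.mpr ⟨i, by simpa using hi, by rw [List.getElem_map]⟩,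
        (pvCellN m i j, pvCellN m i (j + 1)), ?_, ?_⟩
      · refine List.mem_iff_getElem.mpr ⟨j, ?_, ?_⟩
        · simp only [List.length_zip, List.length_tail, hw i hi]; omega
        · rw [List.getElem_zip]
          simp only [List.getElem_tail, hcell i j hi (by omega), hcell i (j + 1) hi (by omega)]
      · rw [pvPairHit_iff]; exact ⟨heq, hne⟩
    · right
      have hi1 : i < m.length := by omega
      refine ⟨(m[i].take (m.headD []).length, m[i + 1].take (m.headD []).length), ?_,
        (pvCellN m i j, pvCellN m (i + 1) j), ?_, ?_⟩
      · refine List.mem_iff_getElem.mpr ⟨i, ?_, ?_⟩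
        · simp only [List.length_zip, List.length_tail, List.length_map]; omega
        · rw [List.getElem_zip]
          simp only [List.getElem_tail, List.getElem_map]
      · refine List.mem_iff_getElem.mpr ⟨j, ?_, ?_⟩
        · simp only [List.length_zip, hw i hi1, hw (i + 1) hi]; omega
        · rw [List.getElem_zip]
          simp only [hcell i j hi1 (by omega), hcell (i + 1) j hi (by omega)]
      · rw [pvPairHit_iff]; exact ⟨heq, hne⟩

-- ===== VERDICT (by name: the statement is the Claim_ definition above) =====
theorem oyun_devam_spec : Claim_equal_oyun_devam := by
  intro m _ hp
  unfold Spec_oyun_devam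
  have hA := A_iff m
  have hB := B_iff m hp
  cases hA2 : oyun_devam m <;> cases hB2 : oyun_devam_alt m <;> simp_all
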